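-- pv_equiv track=rewrite | github.com/alyons/aoc_python | src/AoC2021/day_23.py | room_can_be_entered
-- ===== SOURCE A (Python) =====
-- Amphipod = tuple[int, int, str]
--
-- rooms = {
--     False: {
--         'A': [(2, 1), (2, 2)],
--         'B': [(4, 1), (4, 2)],
--         'C': [(6, 1), (6, 2)],
--         'D': [(8, 1), (8, 2)]
--     },
--     True: {
--         'A': [(2, 1), (2, 2), (2, 3), (2, 4)],
--         'B': [(4, 1), (4, 2), (4, 3), (4, 4)],
--         'C': [(6, 1), (6, 2), (6, 3), (6, 4)],
--         'D': [(8, 1), (8, 2), (8, 3), (8, 4)]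
--     }
-- }
--
-- def room_can_be_entered(code: str, amphipods: list[Amphipod], large_rooms: bool) -> bool:
--     valid = True
--
--     for space in reversed(rooms[large_rooms][code]):
--         occupant = next((a for a in amphipods if a[0] == space[0] and a[1] == space[1]), None)
--         if not occupant:
--             valid &= True
--         else:
--             valid &= occupant[2] == code
--
--     return valid
-- ===== SOURCE B (Python) =====
-- ROOM_X = {'A': 2, 'B': 4, 'C': 6, 'D': 8}
--
-- def room_can_be_entered(code: str, amphipods: list, large_rooms: bool) -> bool:
--     x = ROOM_X[code]
--     depth = 4 if large_rooms else 2
--     room_set = {(x, y) for y in range(1, depth + 1)}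
--     return all(a[2] == code for a in amphipods if (a[0], a[1]) in room_set)
-- ===== Notes on version B (the rewrite author's own statement) =====
-- stated objective: idiomatic
-- what changed: Replaces the per-space loop with next() scans of the amphipod list by one pass over the amphipods with an all(...) checking membership of each amphipod's position in a precomputed set of the room's cells; Pre_ excludes non-'A'..'D' codes (KeyError in both) and lists with two amphipods at the same cell of the requested room, where A's next()-first-match value is accidental.
-- outside the precondition, e.g. on room_can_be_entered('A', [(2, 1, 'A'), (2, 1, 'B')], False): A returns True, B returns False
import Mathlib
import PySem

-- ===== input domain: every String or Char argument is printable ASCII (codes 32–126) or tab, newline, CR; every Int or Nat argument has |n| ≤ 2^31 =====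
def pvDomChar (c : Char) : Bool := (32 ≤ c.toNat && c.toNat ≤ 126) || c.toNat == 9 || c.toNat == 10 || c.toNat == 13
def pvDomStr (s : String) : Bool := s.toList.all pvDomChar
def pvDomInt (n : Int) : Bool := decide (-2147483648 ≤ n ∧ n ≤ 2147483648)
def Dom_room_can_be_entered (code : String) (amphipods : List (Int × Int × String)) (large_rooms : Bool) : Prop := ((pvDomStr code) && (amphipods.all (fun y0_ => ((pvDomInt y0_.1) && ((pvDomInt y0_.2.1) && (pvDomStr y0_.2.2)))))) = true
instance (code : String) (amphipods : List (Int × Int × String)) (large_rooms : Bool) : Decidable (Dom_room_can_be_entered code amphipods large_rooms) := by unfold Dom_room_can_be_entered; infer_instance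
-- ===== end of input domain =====

-- B replaces A's per-space scans of the amphipod list by a single pass over the
-- amphipods with membership in a precomputed set of the room's cells (idiomatic, one pass).

-- ===== PORT A =====
-- rooms[large_rooms][code]; a code outside 'A'..'D' is a KeyError in Python (excluded by Pre_),
-- the [] returned here is never relied on.
def pvRoomsA (large_rooms : Bool) (code : String) : List (Int × Int) :=
  if large_rooms then
    if code = "A" then [(2,1),(2,2),(2,3),(2,4)]
    else if code = "B" then [(4,1),(4,2),(4,3),(4,4)]
    else if code = "C" then [(6,1),(6,2),(6,3),(6,4)]
    else if code = "D" then [(8,1),(8,2),(8,3),(8,4)]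
    else []
  else
    if code = "A" then [(2,1),(2,2)]
    else if code = "B" then [(4,1),(4,2)]
    else if code = "C" then [(6,1),(6,2)]
    else if code = "D" then [(8,1),(8,2)]
    else []

def room_can_be_entered (code : String) (amphipods : List (Int × Int × String)) (large_rooms : Bool) : Bool :=
  (pvRoomsA large_rooms code).reverse.foldl
    (fun valid space =>
      match amphipods.find? (fun a => a.1 == space.1 && a.2.1 == space.2) with
      | none => valid && true
      | some occupant => valid && (occupant.2.2 == code)) true

-- ===== PORT B =====
-- ROOM_X[code]; a code outside 'A'..'D' is a KeyError in Python (excluded by Pre_).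
def pvRoomX (code : String) : Int :=
  if code = "A" then 2 else if code = "B" then 4 else if code = "C" then 6 else 8

def room_can_be_entered_alt (code : String) (amphipods : List (Int × Int × String)) (large_rooms : Bool) : Bool :=
  let x := pvRoomX code
  let depth : Int := if large_rooms then 4 else 2
  let roomSet : PySem.Set (Int × Int) :=
    PySem.Set.ofList ((PySem.List.pyRange 1 (depth + 1) 1).map (fun y => (x, y)))
  amphipods.all (fun a => !(PySem.Set.contains roomSet (a.1, a.2.1)) || (a.2.2 == code))

-- ===== PRECONDITION & SPEC =====
-- the cells of the requested room, stated independently of the ports for use in Pre_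
def pvPreCells (code : String) (large_rooms : Bool) : List (Int × Int) :=
  (if large_rooms then [(1 : Int), 2, 3, 4] else [1, 2]).map
    (fun y => ((if code = "A" then 2 else if code = "B" then 4 else if code = "C" then 6 else 8 : Int), y))

-- Pre_ excludes codes outside 'A'..'D' (A raises KeyError there) and amphipod lists with two
-- amphipods at the same cell of the requested room, where A's next()-first-match value is accidental.
def Pre_room_can_be_entered (code : String) (amphipods : List (Int × Int × String)) (large_rooms : Bool) : Prop :=
  code ∈ ["A", "B", "C", "D"] ∧
  amphipods.Pairwise
    (fun a b => (a.1, a.2.1) = (b.1, b.2.1) → (a.1, a.2.1) ∉ pvPreCells code large_rooms)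
instance (code : String) (amphipods : List (Int × Int × String)) (large_rooms : Bool) : Decidable (Pre_room_can_be_entered code amphipods large_rooms) := by unfold Pre_room_can_be_entered; infer_instance

def pvWitness_room_can_be_entered : String × (List (Int × Int × String)) × Bool :=
  ("B", [(4, 1, "B"), (4, 2, "A"), (0, 0, "C")], false)

def Spec_room_can_be_entered (code : String) (amphipods : List (Int × Int × String)) (large_rooms : Bool) (out : Bool) : Prop := out = room_can_be_entered_alt code amphipods large_rooms
instance (code : String) (amphipods : List (Int × Int × String)) (large_rooms : Bool) (out : Bool) : Decidable (Spec_room_can_be_entered code amphipods large_rooms out) := by unfold Spec_room_can_be_entered; infer_instance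

-- ===== CLAIM (what is proved, stated in full; the proofs are below) =====
def Claim_equal_room_can_be_entered : Prop := ∀ (code : String) (amphipods : List (Int × Int × String)) (large_rooms : Bool), Dom_room_can_be_entered code amphipods large_rooms → Pre_room_can_be_entered code amphipods large_rooms → Spec_room_can_be_entered code amphipods large_rooms (room_can_be_entered code amphipods large_rooms)

-- ===== LEMMAS AND PROOFS =====

-- A's 'valid &= …' fold is an all over the spaces.
theorem pv_foldl_and {α : Type} (g : α → Bool) (l : List α) (b : Bool) :
    l.foldl (fun v s => v && g s) b = (b && l.all g) := by
  induction l generalizing b with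
  | nil => simp
  | cons s t ih => simp [List.foldl_cons, ih, Bool.and_assoc]

-- With pairwise-distinct positions, the first occupant found at a space carries the
-- only code of any amphipod at that space.
theorem pv_find_eq_all (amphipods : List (Int × Int × String)) (space : Int × Int) (code : String)
    (S : List (Int × Int)) (hS : space ∈ S)
    (h : amphipods.Pairwise (fun a b => (a.1, a.2.1) = (b.1, b.2.1) → (a.1, a.2.1) ∉ S)) :
    (match amphipods.find? (fun a => a.1 == space.1 && a.2.1 == space.2) with
      | none => true
      | some occupant => occupant.2.2 == code)
    = amphipods.all (fun a => !(a.1 == space.1 && a.2.1 == space.2) || (a.2.2 == code)) := by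
  induction amphipods with
  | nil => simp
  | cons a t ih =>
    rcases List.pairwise_cons.mp h with ⟨ha, ht⟩
    by_cases hm : (a.1 == space.1 && a.2.1 == space.2) = true
    · have hpos : (a.1, a.2.1) = space := by
        have h1 := (beq_iff_eq).mp (Bool.and_elim_left hm)
        have h2 := (beq_iff_eq).mp (Bool.and_elim_right hm)
        cases space; simp_all
      have htall : t.all (fun b => !(b.1 == space.1 && b.2.1 == space.2) || (b.2.2 == code)) = true := by
        rw [List.all_eq_true]
        intro b hb
        have hbm : ¬ ((b.1 == space.1 && b.2.1 == space.2) = true) := by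
          intro hbm
          have hbpos : (b.1, b.2.1) = space := by
            have h1 := (beq_iff_eq).mp (Bool.and_elim_left hbm)
            have h2 := (beq_iff_eq).mp (Bool.and_elim_right hbm)
            cases space; simp_all
          exact ha b hb (by rw [hpos, hbpos]) (by rw [hpos]; exact hS)
        simp [hbm]
      simp only [List.find?_cons, hm, List.all_cons, Bool.not_true, Bool.false_or, htall,
        Bool.and_true]
    · simp only [Bool.not_eq_true] at hm
      simp only [List.find?_cons, hm, List.all_cons, Bool.not_false, Bool.true_or, Bool.true_and]
      exact ih ht

-- all congruence on members
theorem pv_all_congr {α : Type} (l : List α) (p q : α → Bool) (h : ∀ x ∈ l, p x = q x) :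
    l.all p = l.all q := by
  induction l with
  | nil => rfl
  | cons a t ih =>
    simp only [List.all_cons, h a (List.mem_cons_self ..), ih (fun x hx => h x (List.mem_cons_of_mem _ hx))]

-- all-all swap: checking every space against every amphipod equals checking every
-- amphipod's position for membership in the space list.
theorem pv_all_swap (spaces : List (Int × Int)) (amphipods : List (Int × Int × String)) (code : String) :
    spaces.all (fun s => amphipods.all (fun a => !(a.1 == s.1 && a.2.1 == s.2) || (a.2.2 == code)))
    = amphipods.all (fun a => !(spaces.contains (a.1, a.2.1)) || (a.2.2 == code)) := by
  rw [Bool.eq_iff_iff]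
  simp only [List.all_eq_true, Bool.or_eq_true, Bool.not_eq_true', Bool.and_eq_false_iff,
    List.contains_eq_mem, decide_eq_false_iff_not, beq_iff_eq, beq_eq_false_iff_ne, ne_eq]
  constructor
  · intro h a ha
    by_cases hc : (a.1, a.2.1) ∈ spaces
    · rcases h (a.1, a.2.1) hc a ha with h1 | h2
      · rcases h1 with h1 | h1 <;> exact absurd rfl h1
      · right; exact h2
    · left; exact hc
  · intro h s hs a ha
    rcases h a ha with h1 | h2
    · left
      by_cases e1 : a.1 = s.1
      · right
        intro e2
        apply h1
        cases s
        simp_all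
      · left; exact e1
    · right; exact h2

-- main bridge, for an arbitrary space list
theorem pv_main (spaces : List (Int × Int)) (amphipods : List (Int × Int × String)) (code : String)
    (h : amphipods.Pairwise (fun a b => (a.1, a.2.1) = (b.1, b.2.1) → (a.1, a.2.1) ∉ spaces)) :
    spaces.reverse.foldl
      (fun valid space =>
        match amphipods.find? (fun a => a.1 == space.1 && a.2.1 == space.2) with
        | none => valid && true
        | some occupant => valid && (occupant.2.2 == code)) true
    = amphipods.all (fun a => !(spaces.contains (a.1, a.2.1)) || (a.2.2 == code)) := by
  have hstep : ∀ (l : List (Int × Int)) (b : Bool),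
      l.foldl
        (fun valid space =>
          match amphipods.find? (fun a => a.1 == space.1 && a.2.1 == space.2) with
          | none => valid && true
          | some occupant => valid && (occupant.2.2 == code)) b
      = l.foldl (fun v s => v &&
          (match amphipods.find? (fun a => a.1 == s.1 && a.2.1 == s.2) with
            | none => true
            | some occupant => occupant.2.2 == code)) b := by
    have hfun : ∀ (v : Bool) (s : Int × Int),
        (match amphipods.find? (fun a => a.1 == s.1 && a.2.1 == s.2) with
          | none => v && true
          | some occupant => v && (occupant.2.2 == code))
        = (v && (match amphipods.find? (fun a => a.1 == s.1 && a.2.1 == s.2) with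
            | none => true
            | some occupant => occupant.2.2 == code)) := by
      intro v s
      cases hf : amphipods.find? (fun a => a.1 == s.1 && a.2.1 == s.2) <;> simp
    intro l
    induction l with
    | nil => intro b; rfl
    | cons s t ih =>
      intro b
      rw [List.foldl_cons, List.foldl_cons, hfun, ih]
  rw [hstep, pv_foldl_and, Bool.true_and, List.all_reverse]
  calc spaces.all (fun s => (match amphipods.find? (fun a => a.1 == s.1 && a.2.1 == s.2) with
          | none => true
          | some occupant => occupant.2.2 == code))
      = spaces.all (fun s => amphipods.all (fun a => !(a.1 == s.1 && a.2.1 == s.2) || (a.2.2 == code))) :=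
        pv_all_congr _ _ _ (fun s hs => pv_find_eq_all amphipods s code spaces hs h)
    _ = _ := pv_all_swap spaces amphipods code

-- ===== VERDICT (by name: the statement is the Claim_ definition above) =====
theorem room_can_be_entered_spec : Claim_equal_room_can_be_entered := by
  intro code amphipods large_rooms _ hpre
  rcases hpre with ⟨hcode, hnodup⟩
  unfold Spec_room_can_be_entered room_can_be_entered room_can_be_entered_alt
  have hcells : pvPreCells code large_rooms = pvRoomsA large_rooms code := by
    fin_cases hcode <;> cases large_rooms <;> rfl
  rw [hcells] at hnodup
  rw [pv_main _ _ _ hnodup]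
  fin_cases hcode <;> cases large_rooms <;> rfl
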